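-- pv_equiv track=rewrite | github.com/sarraljnf/data-portfolio | Application /Intelligence_artificielle_et_santé/Code_backend_equipe_4/Code.py | peut_assigner
-- ===== SOURCE A (Python) =====
-- def peut_assigner(patient, heure, salle, chir, lit,
--                 occupation_salles, occupation_chir, occupation_lits,
--                 occupation_anest, occupation_infirmiers,
--                 duree_interv, duree_sejour):
--     debut_interv = heure
--     fin_interv = heure + duree_interv
--     debut_sejour = fin_interv
--     fin_sejour = fin_interv + duree_sejour
--
--     # -----------------------------
--     # 🚫 Vérification type de lit selon durée de séjour
--     # -----------------------------
--     if duree_sejour < 24:  # séjour inférieur à 1 jour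
--         # Patient ambulatoire : doit aller dans un lit avec "*"
--         if "*" not in lit:
--             return False
--     else:
--         # Patient hospitalisé classique : lit sans "*"
--         if "*" in lit:
--             return False
--
--     # -----------------------------
--     # Vérification du type de salle selon spécialité
--     # ----------------------------
--     specialite = patient.get('specialite', None)
--     if specialite is None:
--         return False
--
--     if specialite in [0, 1]:
--         # Spécialité 0 ou 1 → salle "B1..."
--         if not salle.startswith("B1"):
--             return False
--     else:
--         # Autres spécialités → pas dans "B1"
--         if salle.startswith("B1"):
--             return False
--
--     # -----------------------------
--     # Vérification salles
--     # -----------------------------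
--     for d, f in occupation_salles[salle]:
--         if not (fin_interv <= d or debut_interv >= f):
--             return False
--
--     # -----------------------------
--     # Vérification chirurgien
--     # -----------------------------
--     for d, f in occupation_chir[chir]:
--         if not (fin_interv <= d or debut_interv >= f):
--             return False
--
--     # -----------------------------
--     # Vérification lit (sur tout le séjour)
--     # -----------------------------
--     for d, f in occupation_lits[lit]:
--         if not (fin_sejour <= d or debut_sejour >= f):
--             return False
--
--     # -----------------------------
--     # Vérification anesthésistes (pendant l'intervention)
--     # -----------------------------
--     anesth = patient.get('anesthesistes', None)
--     if anesth is None: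
--         return False
--     for d, f in occupation_anest[anesth]:
--         if not (fin_interv <= d or debut_interv >= f):
--             return False
--
--     # -----------------------------
--     # Si tout est bon
--     # -----------------------------
--     return True
-- ===== SOURCE B (Python) =====
-- from bisect import bisect_left
--
--
-- def _libre(intervalles, debut, fin):
--     # Sort occupations by start, build a prefix-maximum of their end times,
--     # then bisect to the first occupation starting at/after `fin`: the window
--     # [debut, fin) is free iff the latest end among the earlier ones is <= debut.
--     ivs = sorted(intervalles, key=lambda p: p[0])
--     starts = [d for d, _ in ivs]
--     prefmax = []
--     m = None
--     for _, f in ivs: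
--         if m is None or f > m:
--             m = f
--         prefmax.append(m)
--     i = bisect_left(starts, fin)
--     return i == 0 or prefmax[i - 1] <= debut
--
--
-- def peut_assigner(patient, heure, salle, chir, lit,
--                 occupation_salles, occupation_chir, occupation_lits,
--                 occupation_anest, occupation_infirmiers,
--                 duree_interv, duree_sejour):
--     fin_interv = heure + duree_interv
--     fin_sejour = fin_interv + duree_sejour
--     spec = patient.get('specialite')
--     if spec is None:
--         return False
--     anesth = patient.get('anesthesistes')
--     return ((duree_sejour < 24) == ('*' in lit)
--             and (spec in (0, 1)) == salle.startswith('B1')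
--             and _libre(occupation_salles[salle], heure, fin_interv)
--             and _libre(occupation_chir[chir], heure, fin_interv)
--             and _libre(occupation_lits[lit], fin_interv, fin_sejour)
--             and anesth is not None
--             and _libre(occupation_anest[anesth], heure, fin_interv))
-- ===== Notes on version B (the rewrite author's own statement) =====
-- stated objective: alternative
-- what changed: Instead of A's per-interval early-exit conflict scan, B sorts each resource's occupations by start time, builds a prefix-maximum array of end times, and binary-searches (bisect) for the window's end, deciding freedom by a single comparison of one prefix-maximum entry; the guard cascade becomes a short-circuit boolean chain.
import Mathlib
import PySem

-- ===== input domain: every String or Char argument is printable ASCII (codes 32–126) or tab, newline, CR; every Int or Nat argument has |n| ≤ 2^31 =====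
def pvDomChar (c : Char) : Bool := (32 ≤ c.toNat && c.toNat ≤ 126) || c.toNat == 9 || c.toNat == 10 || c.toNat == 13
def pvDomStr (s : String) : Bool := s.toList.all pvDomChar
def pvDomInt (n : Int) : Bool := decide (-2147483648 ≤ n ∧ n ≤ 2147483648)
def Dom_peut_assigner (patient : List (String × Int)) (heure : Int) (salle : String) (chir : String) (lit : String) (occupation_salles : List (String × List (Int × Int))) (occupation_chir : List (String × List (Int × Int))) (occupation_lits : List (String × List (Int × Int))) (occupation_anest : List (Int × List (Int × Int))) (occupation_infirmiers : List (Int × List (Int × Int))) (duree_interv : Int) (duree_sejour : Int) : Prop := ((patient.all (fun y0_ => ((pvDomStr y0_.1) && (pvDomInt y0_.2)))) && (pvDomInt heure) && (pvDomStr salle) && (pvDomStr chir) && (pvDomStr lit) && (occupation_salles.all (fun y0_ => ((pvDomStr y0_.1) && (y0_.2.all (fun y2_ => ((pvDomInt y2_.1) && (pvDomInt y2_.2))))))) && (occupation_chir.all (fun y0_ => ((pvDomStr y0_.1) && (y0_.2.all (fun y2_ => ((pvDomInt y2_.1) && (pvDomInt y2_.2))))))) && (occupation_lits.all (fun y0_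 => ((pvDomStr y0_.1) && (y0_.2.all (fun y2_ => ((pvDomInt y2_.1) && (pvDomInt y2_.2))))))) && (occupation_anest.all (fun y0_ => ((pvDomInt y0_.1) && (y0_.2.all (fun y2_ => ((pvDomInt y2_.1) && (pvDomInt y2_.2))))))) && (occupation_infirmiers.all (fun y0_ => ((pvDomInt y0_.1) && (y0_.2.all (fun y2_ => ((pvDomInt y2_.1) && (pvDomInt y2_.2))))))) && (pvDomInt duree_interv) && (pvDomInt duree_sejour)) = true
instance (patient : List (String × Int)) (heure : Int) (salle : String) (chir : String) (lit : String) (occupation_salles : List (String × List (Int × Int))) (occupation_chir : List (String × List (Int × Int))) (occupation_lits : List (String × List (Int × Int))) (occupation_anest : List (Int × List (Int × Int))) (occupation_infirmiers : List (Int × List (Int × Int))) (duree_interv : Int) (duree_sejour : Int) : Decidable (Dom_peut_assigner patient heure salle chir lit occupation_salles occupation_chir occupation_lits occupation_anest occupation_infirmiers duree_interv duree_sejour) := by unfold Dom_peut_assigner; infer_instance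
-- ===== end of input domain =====

-- B replaces A's per-interval early-exit conflict scans: each resource's occupations are sorted
-- by start time, a prefix-maximum array of end times is built, and a binary search (bisect) on the
-- window's end decides freedom with one comparison; objective: alternative (different algorithm).
-- ===== PORT A =====
-- dict lookup (first match) shared helper
def pvGet? {κ ν : Type} [BEq κ] (d : List (κ × ν)) (k : κ) : Option ν :=
  (d.find? (fun p => p.1 == k)).map (·.2)

-- A's 'for d, f in …: if not (fin <= d or debut >= f): return False' loop
def pvScan (debut fin : Int) : List (Int × Int) → Bool
  | [] => true
  | p :: rest => if !(decide (fin ≤ p.1) || decide (debut ≥ p.2)) then false else pvScan debut fin rest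

def peut_assigner (patient : List (String × Int)) (heure : Int) (salle : String) (chir : String) (lit : String) (occupation_salles : List (String × List (Int × Int))) (occupation_chir : List (String × List (Int × Int))) (occupation_lits : List (String × List (Int × Int))) (occupation_anest : List (Int × List (Int × Int))) (occupation_infirmiers : List (Int × List (Int × Int))) (duree_interv : Int) (duree_sejour : Int) : Bool :=
  let debut_interv := heure
  let fin_interv := heure + duree_interv
  let debut_sejour := fin_interv
  let fin_sejour := fin_interv + duree_sejour
  -- code after the lit-type check (shared by both branches of that check)
  let cont : Bool :=
    match pvGet? patient "specialite" with
    | none => false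
    | some specialite =>
      let cont2 : Bool :=
        if !pvScan debut_interv fin_interv ((pvGet? occupation_salles salle).getD []) then false
        else if !pvScan debut_interv fin_interv ((pvGet? occupation_chir chir).getD []) then false
        else if !pvScan debut_sejour fin_sejour ((pvGet? occupation_lits lit).getD []) then false
        else match pvGet? patient "anesthesistes" with
          | none => false
          | some anesth => pvScan debut_interv fin_interv ((pvGet? occupation_anest anesth).getD [])
      if specialite = 0 ∨ specialite = 1 then
        if !(PySem.Str.startswith salle "B1") then false else cont2
      else
        if PySem.Str.startswith salle "B1" then false else cont2
  if duree_sejour < 24 then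
    if !(PySem.Str.isIn "*" lit) then false else cont
  else
    if PySem.Str.isIn "*" lit then false else cont

-- ===== PORT B =====
-- Source B's prefix-maximum loop over the sorted occupations (m starts as None)
def pvPrefMax : Option Int → List (Int × Int) → List Int
  | _, [] => []
  | m, p :: rest =>
    let m' := match m with | none => p.2 | some v => if p.2 > v then p.2 else v
    m' :: pvPrefMax (some m') rest

-- Source B's _libre: sort by start, prefix-max of ends, bisect_left on starts
-- (prefmax[i-1] is in range whenever i ≠ 0, since bisect_left ≤ len; getD is exact there)
def pvLibre (iv : List (Int × Int)) (debut fin : Int) : Bool :=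
  let ivs := PySem.List.sorted iv (·.1)
  let starts := ivs.map (·.1)
  let pm := pvPrefMax none ivs
  let i := PySem.List.bisectLeft starts fin
  i == 0 || decide (pm.getD (i - 1) 0 ≤ debut)

def peut_assigner_alt (patient : List (String × Int)) (heure : Int) (salle : String) (chir : String) (lit : String) (occupation_salles : List (String × List (Int × Int))) (occupation_chir : List (String × List (Int × Int))) (occupation_lits : List (String × List (Int × Int))) (occupation_anest : List (Int × List (Int × Int))) (occupation_infirmiers : List (Int × List (Int × Int))) (duree_interv : Int) (duree_sejour : Int) : Bool :=
  let fin_interv := heure + duree_interv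
  let fin_sejour := fin_interv + duree_sejour
  match pvGet? patient "specialite" with
  | none => false
  | some spec =>
    let anesth := pvGet? patient "anesthesistes"
    (decide (duree_sejour < 24) == PySem.Str.isIn "*" lit)
    && (decide (spec = 0 ∨ spec = 1) == PySem.Str.startswith salle "B1")
    && pvLibre ((pvGet? occupation_salles salle).getD []) heure fin_interv
    && pvLibre ((pvGet? occupation_chir chir).getD []) heure fin_interv
    && pvLibre ((pvGet? occupation_lits lit).getD []) fin_interv fin_sejour
    && (match anesth with | none => false | some a => pvLibre ((pvGet? occupation_anest a).getD []) heure fin_interv)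

-- ===== PRECONDITION & SPEC =====
def pvFreeB (debut fin : Int) (iv : List (Int × Int)) : Bool :=
  iv.all (fun p => decide (fin ≤ p.1 ∨ debut ≥ p.2))

-- Pre_ excludes exactly the inputs where Python A raises KeyError: a dict lookup is reached
-- (all earlier checks passed, earlier resources conflict-free) but the key is absent.
def Pre_peut_assigner (patient : List (String × Int)) (heure : Int) (salle : String) (chir : String) (lit : String) (occupation_salles : List (String × List (Int × Int))) (occupation_chir : List (String × List (Int × Int))) (occupation_lits : List (String × List (Int × Int))) (occupation_anest : List (Int × List (Int × Int))) (occupation_infirmiers : List (Int × List (Int × Int))) (duree_interv : Int) (duree_sejour : Int) : Prop :=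
  (let fin_interv := heure + duree_interv
   let fin_sejour := fin_interv + duree_sejour
   !((decide (duree_sejour < 24) == PySem.Str.isIn "*" lit)
     && (match pvGet? patient "specialite" with
         | none => false
         | some v => decide (v = 0 ∨ v = 1) == PySem.Str.startswith salle "B1"))
   || match pvGet? occupation_salles salle with
      | none => false
      | some ivS => !pvFreeB heure fin_interv ivS
        || match pvGet? occupation_chir chir with
           | none => false
           | some ivC => !pvFreeB heure fin_interv ivC
             || match pvGet? occupation_lits lit with
                | none => false
                | some ivL => !pvFreeB fin_interv fin_sejour ivL
                  || match pvGet? patient "anesthesistes" with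
                     | none => true
                     | some a => (pvGet? occupation_anest a).isSome) = true
instance (patient : List (String × Int)) (heure : Int) (salle : String) (chir : String) (lit : String) (occupation_salles : List (String × List (Int × Int))) (occupation_chir : List (String × List (Int × Int))) (occupation_lits : List (String × List (Int × Int))) (occupation_anest : List (Int × List (Int × Int))) (occupation_infirmiers : List (Int × List (Int × Int))) (duree_interv : Int) (duree_sejour : Int) : Decidable (Pre_peut_assigner patient heure salle chir lit occupation_salles occupation_chir occupation_lits occupation_anest occupation_infirmiers duree_interv duree_sejour) := by unfold Pre_peut_assigner; infer_instance

def pvWitness_peut_assigner : (List (String × Int)) × Int × String × String × String × (List (String × List (Int × Int))) × (List (String × List (Int × Int))) × (List (String × List (Int × Int))) × (List (Int × List (Int × Int))) × (List (Int × List (Int × Int))) × Int × Int :=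
  ([("specialite", 0), ("anesthesistes", 1)], 0, "B1", "c", "x",
   [("B1", [(5, 7)])], [("c", [])], [("x", [])], [(1, [])], [], 1, 24)

def Spec_peut_assigner (patient : List (String × Int)) (heure : Int) (salle : String) (chir : String) (lit : String) (occupation_salles : List (String × List (Int × Int))) (occupation_chir : List (String × List (Int × Int))) (occupation_lits : List (String × List (Int × Int))) (occupation_anest : List (Int × List (Int × Int))) (occupation_infirmiers : List (Int × List (Int × Int))) (duree_interv : Int) (duree_sejour : Int) (out : Bool) : Prop := out = peut_assigner_alt patient heure salle chir lit occupation_salles occupation_chir occupation_lits occupation_anest occupation_infirmiers duree_interv duree_sejour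
instance (patient : List (String × Int)) (heure : Int) (salle : String) (chir : String) (lit : String) (occupation_salles : List (String × List (Int × Int))) (occupation_chir : List (String × List (Int × Int))) (occupation_lits : List (String × List (Int × Int))) (occupation_anest : List (Int × List (Int × Int))) (occupation_infirmiers : List (Int × List (Int × Int))) (duree_interv : Int) (duree_sejour : Int) (out : Bool) : Decidable (Spec_peut_assigner patient heure salle chir lit occupation_salles occupation_chir occupation_lits occupation_anest occupation_infirmiers duree_interv duree_sejour out) := by unfold Spec_peut_assigner; infer_instance

-- ===== CLAIM (what is proved, stated in full; the proofs are below) =====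
def Claim_equal_peut_assigner : Prop := ∀ (patient : List (String × Int)) (heure : Int) (salle : String) (chir : String) (lit : String) (occupation_salles : List (String × List (Int × Int))) (occupation_chir : List (String × List (Int × Int))) (occupation_lits : List (String × List (Int × Int))) (occupation_anest : List (Int × List (Int × Int))) (occupation_infirmiers : List (Int × List (Int × Int))) (duree_interv : Int) (duree_sejour : Int), Dom_peut_assigner patient heure salle chir lit occupation_salles occupation_chir occupation_lits occupation_anest occupation_infirmiers duree_interv duree_sejour → Pre_peut_assigner patient heure salle chir lit occupation_salles occupation_chir occupation_lits occupation_anest occupation_infirmiers duree_interv duree_sejour → Spec_peut_assigner patient heure salle chir lit occupation_salles occupation_chir occupation_lits occupation_anest occupation_infirmiers duree_interv duree_sejour (peut_assigner patient heure salle chir lit occupation_salles occupation_chir occupation_lits occupation_anest occupation_infirmiers duree_interv duree_sejour)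

-- ===== LEMMAS AND PROOFS =====
-- A's scan is the pointwise 'all' of the no-overlap predicate
theorem pvScan_eq_all (debut fin : Int) (iv : List (Int × Int)) :
    pvScan debut fin iv = iv.all (fun p => decide (fin ≤ p.1) || decide (p.2 ≤ debut)) := by
  induction iv with
  | nil => rfl
  | cons p rest ih =>
    show (if !(decide (fin ≤ p.1) || decide (debut ≥ p.2)) then false else pvScan debut fin rest) = _
    have heq : (decide (fin ≤ p.1) || decide (debut ≥ p.2))
        = (decide (fin ≤ p.1) || decide (p.2 ≤ debut)) := by
      simp only [ge_iff_le]
    rw [heq]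
    by_cases h : (decide (fin ≤ p.1) || decide (p.2 ≤ debut)) = true
    · simp [List.all_cons, h, ih]
    · simp only [Bool.not_eq_true] at h
      simp [List.all_cons, h]

-- prefix-maximum characterisation, running maximum v: pm[j] ≤ debut iff v and the first j+1 ends are ≤ debut
theorem pvPrefMax_some_getD_le (debut : Int) (xs : List (Int × Int)) : ∀ (v : Int) (j : Nat), j < xs.length →
    (((pvPrefMax (some v) xs).getD j 0 ≤ debut) ↔ (v ≤ debut ∧ ∀ p ∈ xs.take (j + 1), p.2 ≤ debut)) := by
  induction xs with
  | nil => intro v j hj; simp at hj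
  | cons p rest ih =>
    intro v j hj
    have hpv : pvPrefMax (some v) (p :: rest)
        = (if p.2 > v then p.2 else v) :: pvPrefMax (some (if p.2 > v then p.2 else v)) rest := rfl
    rw [hpv]
    cases j with
    | zero =>
      simp only [List.getD_cons_zero, List.take_succ_cons, List.take_zero]
      by_cases h : p.2 > v <;> simp [h] <;> omega
    | succ j =>
      have hj' : j < rest.length := by simpa using hj
      simp only [List.getD_cons_succ, List.take_succ_cons]
      rw [ih (if p.2 > v then p.2 else v) j hj']
      by_cases h : p.2 > v
      · simp only [if_pos h]
        constructor
        · rintro ⟨h1, h2⟩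
          refine ⟨by omega, ?_⟩
          intro q hq
          rcases List.mem_cons.mp hq with rfl | hq
          · exact h1
          · exact h2 q hq
        · rintro ⟨h1, h2⟩
          exact ⟨h2 p List.mem_cons_self, fun q hq => h2 q (List.mem_cons_of_mem _ hq)⟩
      · simp only [if_neg h]
        constructor
        · rintro ⟨h1, h2⟩
          refine ⟨h1, ?_⟩
          intro q hq
          rcases List.mem_cons.mp hq with rfl | hq
          · omega
          · exact h2 q hq
        · rintro ⟨h1, h2⟩
          exact ⟨h1, fun q hq => h2 q (List.mem_cons_of_mem _ hq)⟩

theorem pvPrefMax_none_getD_le (debut : Int) (xs : List (Int × Int)) (j : Nat) (hj : j < xs.length) :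
    ((pvPrefMax none xs).getD j 0 ≤ debut) ↔ ∀ p ∈ xs.take (j + 1), p.2 ≤ debut := by
  cases xs with
  | nil => simp at hj
  | cons p rest =>
    have hpv : pvPrefMax none (p :: rest) = p.2 :: pvPrefMax (some p.2) rest := rfl
    rw [hpv]
    cases j with
    | zero => simp
    | succ j =>
      have hj' : j < rest.length := by simpa using hj
      simp only [List.getD_cons_succ, List.take_succ_cons]
      rw [pvPrefMax_some_getD_le debut rest p.2 j hj']
      constructor
      · rintro ⟨h1, h2⟩
        intro q hq
        rcases List.mem_cons.mp hq with rfl | hq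
        · exact h1
        · exact h2 q hq
      · intro h
        exact ⟨h p List.mem_cons_self, fun q hq => h q (List.mem_cons_of_mem _ hq)⟩

-- B's sort + prefix-max + bisect computes A's scan
theorem pvLibre_eq_pvScan (iv : List (Int × Int)) (debut fin : Int) :
    pvLibre iv debut fin = pvScan debut fin iv := by
  rw [pvScan_eq_all]
  simp only [pvLibre]
  set ivs := PySem.List.sorted iv (fun x => x.1) with hivs
  have hperm : ivs.Perm iv := PySem.List.sorted_perm iv (fun x => x.1) false
  rw [← hperm.all_eq]
  have hpw : List.Pairwise (fun a b : Int × Int => a.1 ≤ b.1) ivs :=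
    PySem.List.sorted_pairwise iv (fun x => x.1)
  have hpws : List.Pairwise (fun a b : Int => a ≤ b) (ivs.map (fun x => x.1)) :=
    List.Pairwise.map _ (fun _ _ h => h) hpw
  obtain ⟨hle, hlt, hge⟩ := PySem.List.bisectLeft_spec (ivs.map (fun x => x.1)) fin hpws
  simp only [List.length_map] at hle hlt hge
  generalize hI : PySem.List.bisectLeft (ivs.map (fun x => x.1)) fin = i at hle hlt hge ⊢
  have htake : ∀ j (h : j < ivs.length), j < i → ivs[j].1 < fin := by
    intro j h hj
    have := hlt j (by simpa using h) hj
    simpa using this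
  have hdrop : ∀ j (h : j < ivs.length), i ≤ j → fin ≤ ivs[j].1 := by
    intro j h hj
    have := hge j (by simpa using h) hj
    simpa using this
  -- all over ivs collapses to the end-time test on the first i elements
  have hall : ivs.all (fun p => decide (fin ≤ p.1) || decide (p.2 ≤ debut))
      = decide (∀ p ∈ ivs.take i, p.2 ≤ debut) := by
    by_cases h : ∀ p ∈ ivs.take i, p.2 ≤ debut
    · rw [decide_eq_true h]
      rw [List.all_eq_true]
      intro p hp
      obtain ⟨j, hj, rfl⟩ := List.mem_iff_getElem.mp hp
      by_cases hji : j < i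
      · have hmem : ivs[j] ∈ ivs.take i := by
          have hjt : j < (ivs.take i).length := by
            rw [List.length_take]; omega
          have : (ivs.take i)[j] = ivs[j] := List.getElem_take
          rw [← this]
          exact List.getElem_mem hjt
        simp [h _ hmem]
      · have : fin ≤ ivs[j].1 := hdrop j hj (by omega)
        simp [this]
    · rw [decide_eq_false h]
      rw [List.all_eq_false]
      push Not at h
      obtain ⟨p, hp, hpd⟩ := h
      refine ⟨p, List.mem_of_mem_take hp, ?_⟩
      obtain ⟨j, hj, rfl⟩ := List.mem_iff_getElem.mp hp
      have hjl : j < ivs.length := by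
        have := List.length_take_le i ivs
        rw [List.length_take] at hj; omega
      have hji : j < i := by rw [List.length_take] at hj; omega
      rw [List.getElem_take] at hpd ⊢
      have : ivs[j].1 < fin := htake j hjl hji
      simp
      omega
  rw [hall]
  cases i with
  | zero => simp
  | succ k =>
    have hk : k < ivs.length := by omega
    have hiff := pvPrefMax_none_getD_le debut ivs k hk
    have hkk : k + 1 - 1 = k := by omega
    rw [hkk]
    have hbeq : ((k + 1 : Nat) == 0) = false := by simp
    rw [hbeq, Bool.false_or]
    exact decide_eq_decide.mpr hiff

-- ===== VERDICT (by name: the statement is the Claim_ definition above) =====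
theorem peut_assigner_spec : Claim_equal_peut_assigner := by
  intro patient heure salle chir lit os oc ol oa oi di ds _ _
  unfold Spec_peut_assigner peut_assigner peut_assigner_alt
  simp only [pvLibre_eq_pvScan]
  cases hs : pvGet? patient "specialite" with
  | none =>
    cases hlt : decide (ds < 24) <;> cases hin : PySem.Str.isIn "*" lit <;>
      simp
  | some v =>
    cases hlt : decide (ds < 24) <;> cases hin : PySem.Str.isIn "*" lit <;>
    cases hsp : decide (v = 0 ∨ v = 1) <;> cases hb1 : PySem.Str.startswith salle "B1" <;>
    cases h1 : pvScan heure (heure + di) ((pvGet? os salle).getD []) <;>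
    cases h2 : pvScan heure (heure + di) ((pvGet? oc chir).getD []) <;>
    cases h3 : pvScan (heure + di) (heure + di + ds) ((pvGet? ol lit).getD []) <;>
      simp_all
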